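-- pv_equiv track=rewrite | github.com/Clement25/Speech-and-Language-Processing-ver3-solutions | Constituency Parsing/CKY.py | FindGrammar
-- ===== SOURCE A (Python) =====
-- def FindGrammar(grammar, word=None, prod1=None, prod2=None):
--     """Find a pair in grammar
--     @param (word): the word to be searched as a terminal
--     """
--     if word:
--         heads = set(head for (head, symbol) in grammar if symbol==[word])
--         return heads
--     # search for 2 productions
--     elif prod1 and prod2:
--         heads = set()
--         for B in prod1:
--             for C in prod2:
--                 for (head, symbol) in grammar:
--                      if symbol==[B, C]:
--                         heads.add(head)
--         return heads
--     else:
--         return None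
-- ===== SOURCE B (Python) =====
-- def FindGrammar(grammar, word=None, prod1=None, prod2=None):
--     if word:
--         return {head for (head, symbol) in grammar if symbol == [word]}
--     elif prod1 and prod2:
--         index = {}
--         for (head, symbol) in grammar:
--             if len(symbol) == 2:
--                 index.setdefault((symbol[0], symbol[1]), []).append(head)
--         return set(h for B in prod1 for C in prod2 for h in index.get((B, C), []))
--     else:
--         return None
-- ===== Notes on version B (the rewrite author's own statement) =====
-- stated objective: alternative
-- what changed: In the prod1/prod2 branch B builds, in one pass over grammar, a dict mapping each 2-symbol production pair to its list of heads, then forms the result set from a flat generator of dict lookups over the (B, C) pairs, removing A's inner rescans of grammar; the word and else branches are otherwise unchanged.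
import Mathlib
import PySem

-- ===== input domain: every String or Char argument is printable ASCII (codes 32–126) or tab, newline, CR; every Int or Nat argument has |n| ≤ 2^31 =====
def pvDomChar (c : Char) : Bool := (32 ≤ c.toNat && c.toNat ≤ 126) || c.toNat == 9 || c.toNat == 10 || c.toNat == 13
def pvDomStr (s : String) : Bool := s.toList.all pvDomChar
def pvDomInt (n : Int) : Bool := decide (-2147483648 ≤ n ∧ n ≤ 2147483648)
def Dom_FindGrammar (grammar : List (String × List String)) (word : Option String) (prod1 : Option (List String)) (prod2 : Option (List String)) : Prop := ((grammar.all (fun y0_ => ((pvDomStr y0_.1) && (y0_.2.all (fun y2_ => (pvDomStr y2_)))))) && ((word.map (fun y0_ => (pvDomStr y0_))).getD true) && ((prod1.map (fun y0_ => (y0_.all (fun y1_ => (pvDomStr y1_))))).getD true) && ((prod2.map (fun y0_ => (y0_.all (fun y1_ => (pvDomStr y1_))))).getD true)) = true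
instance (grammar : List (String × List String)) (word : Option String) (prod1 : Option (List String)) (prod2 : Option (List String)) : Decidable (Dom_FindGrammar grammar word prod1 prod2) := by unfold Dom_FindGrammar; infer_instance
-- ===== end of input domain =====

-- B replaces A's triple nested loop (a grammar rescan for every (B, C) pair) by one indexing pass over grammar plus dict lookups; order of insertion into the result set is preserved.


-- ===== PORT A =====
-- the `elif prod1 and prod2: … else: return None` part of A (triple nested loop)
def FindGrammarProd (grammar : List (String × List String)) (prod1 : Option (List String)) (prod2 : Option (List String)) : Option (List String) :=
  match prod1, prod2 with
  | some p1, some p2 =>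
    if p1 != [] && p2 != [] then
      some (p1.foldl (fun s B =>
        p2.foldl (fun s C =>
          grammar.foldl (fun s hs => if hs.2 == [B, C] then PySem.Set.add s hs.1 else s) s) s)
        PySem.Set.empty)
    else none
  | _, _ => none

def FindGrammar (grammar : List (String × List String)) (word : Option String) (prod1 : Option (List String)) (prod2 : Option (List String)) : Option (List String) :=
  match word with
  | some w =>
    if w != "" then
      some (PySem.Set.ofList ((grammar.filter (fun hs => hs.2 == [w])).map (·.1)))
    else FindGrammarProd grammar prod1 prod2
  | none => FindGrammarProd grammar prod1 prod2

-- ===== PORT B =====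
-- B's one-pass index over grammar: (symbol[0], symbol[1]) ↦ heads of the 2-symbol productions, in grammar order
def pvIndex (grammar : List (String × List String)) : PySem.Dict (String × String) (List String) :=
  grammar.foldl (fun d hs =>
    match hs.2 with
    | [a, b] => d.modify (a, b) [] (· ++ [hs.1])
    | _ => d) PySem.Dict.empty

def FindGrammar_alt (grammar : List (String × List String)) (word : Option String) (prod1 : Option (List String)) (prod2 : Option (List String)) : Option (List String) :=
  if (word.getD "") != "" then
    some (PySem.Set.ofList (grammar.filterMap (fun hs => if hs.2 == [word.getD ""] then some hs.1 else none)))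
  else
    match prod1, prod2 with
    | some (B :: bs), some (C :: cs) =>
        let index := pvIndex grammar
        some (PySem.Set.ofList ((B :: bs).flatMap (fun B' => (C :: cs).flatMap (fun C' => index.getD (B', C') []))))
    | _, _ => none

-- ===== PRECONDITION & SPEC =====
def Spec_FindGrammar (grammar : List (String × List String)) (word : Option String) (prod1 : Option (List String)) (prod2 : Option (List String)) (out : Option (List String)) : Prop := out = FindGrammar_alt grammar word prod1 prod2
instance (grammar : List (String × List String)) (word : Option String) (prod1 : Option (List String)) (prod2 : Option (List String)) (out : Option (List String)) : Decidable (Spec_FindGrammar grammar word prod1 prod2 out) := by unfold Spec_FindGrammar; infer_instance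

-- ===== CLAIM (what is proved, stated in full; the proofs are below) =====
def Claim_equal_FindGrammar : Prop := ∀ (grammar : List (String × List String)) (word : Option String) (prod1 : Option (List String)) (prod2 : Option (List String)), Dom_FindGrammar grammar word prod1 prod2 → Spec_FindGrammar grammar word prod1 prod2 (FindGrammar grammar word prod1 prod2)

-- ===== LEMMAS AND PROOFS =====

-- the word branch: A's filter-then-map equals B's filterMap
theorem filterMap_eq_word (grammar : List (String × List String)) (w : String) :
    grammar.filterMap (fun hs => if hs.2 == [w] then some hs.1 else none)
    = (grammar.filter (fun hs => hs.2 == [w])).map (·.1) := by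
  induction grammar with
  | nil => rfl
  | cons hs t ih =>
    by_cases h : hs.2 = [w] <;>
      simp [h] <;>
      simpa using ih

-- the index's entry at (B, C) is exactly the heads of grammar rules with symbol [B, C], in order
theorem getD_pvIndexStep (grammar : List (String × List String))
    (d : PySem.Dict (String × String) (List String)) (B C : String) :
    (grammar.foldl (fun d hs =>
      match hs.2 with
      | [a, b] => d.modify (a, b) [] (· ++ [hs.1])
      | _ => d) d).getD (B, C) []
    = d.getD (B, C) [] ++ (grammar.filter (fun hs => hs.2 == [B, C])).map (·.1) := by
  induction grammar generalizing d with
  | nil => simp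
  | cons hs t ih =>
    obtain ⟨h, sym⟩ := hs
    match sym with
    | [a, b] =>
        simp only [List.foldl_cons, List.filter_cons, ih]
        rw [PySem.Dict.getD_modify]
        by_cases hk : a = B ∧ b = C
        · obtain ⟨rfl, rfl⟩ := hk
          simp
        · have hbeq : ([a, b] == [B, C]) = false := by
            rw [beq_eq_false_iff_ne]
            intro he
            injection he with h1 h2; injection h2 with h2 _
            exact hk ⟨h1, h2⟩
          simp [hbeq]
          intro h1 h2; exact absurd ⟨h1.symm, h2.symm⟩ hk
    | [] => simpa using ih d
    | [a] => simpa using ih d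
    | a :: b :: c :: r =>
        have hbeq : ((a :: b :: c :: r : List String) == [B, C]) = false := by simp
        simp only [List.foldl_cons, List.filter_cons, hbeq]
        exact ih d

theorem getD_pvIndex (grammar : List (String × List String)) (B C : String) :
    (pvIndex grammar).getD (B, C) []
    = (grammar.filter (fun hs => hs.2 == [B, C])).map (·.1) := by
  have := getD_pvIndexStep grammar PySem.Dict.empty B C
  simpa [pvIndex] using this

-- folding over a flatMap is the nested fold
theorem foldl_flatMap' {α β γ : Type} (l : List α) (g : α → List β) (f : γ → β → γ) (init : γ) :
    (l.flatMap g).foldl f init = l.foldl (fun acc x => (g x).foldl f acc) init := by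
  induction l generalizing init with
  | nil => rfl
  | cons x t ih => simp [List.flatMap_cons, List.foldl_append, ih]

-- A's inner grammar scan for one (B, C) is a fold of adds over the matching heads
theorem inner_scan_eq (grammar : List (String × List String)) (B C : String) (s : PySem.Set String) :
    grammar.foldl (fun s hs => if hs.2 == [B, C] then PySem.Set.add s hs.1 else s) s
    = ((grammar.filter (fun hs => hs.2 == [B, C])).map (·.1)).foldl PySem.Set.add s := by
  rw [PySem.List.foldl_if_eq_foldl_filter, List.foldl_map]

theorem prod_branch_eq (grammar : List (String × List String)) (p1 p2 : List String) :
    p1.foldl (fun s B =>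
      p2.foldl (fun s C =>
        grammar.foldl (fun s hs => if hs.2 == [B, C] then PySem.Set.add s hs.1 else s) s) s)
      PySem.Set.empty
    = PySem.Set.ofList (p1.flatMap (fun B => p2.flatMap (fun C => (pvIndex grammar).getD (B, C) []))) := by
  rw [PySem.Set.ofList_eq_foldl, foldl_flatMap']
  apply PySem.List.foldl_congr_mem
  intro s B _
  rw [foldl_flatMap']
  apply PySem.List.foldl_congr_mem
  intro s' C _
  rw [inner_scan_eq, getD_pvIndex]

-- ===== VERDICT (by name: the statement is the Claim_ definition above) =====
theorem FindGrammar_spec : Claim_equal_FindGrammar := by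
  intro grammar word prod1 prod2 hd
  clear hd
  unfold Spec_FindGrammar FindGrammar FindGrammar_alt
  have hprod : FindGrammarProd grammar prod1 prod2
      = match prod1, prod2 with
        | some (B :: bs), some (C :: cs) =>
            some (PySem.Set.ofList ((B :: bs).flatMap
              (fun B' => (C :: cs).flatMap (fun C' => (pvIndex grammar).getD (B', C') []))))
        | _, _ => none := by
    unfold FindGrammarProd
    match prod1, prod2 with
    | none, none => rfl
    | none, some [] => rfl
    | none, some (_ :: _) => rfl
    | some [], none => rfl
    | some (_ :: _), none => rfl
    | some [], some [] => rfl
    | some [], some (_ :: _) => simp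
    | some (B :: bs), some [] => simp
    | some (B :: bs), some (C :: cs) =>
        simpa using congrArg some (prod_branch_eq grammar (B :: bs) (C :: cs))
  match word with
  | none => simpa using hprod
  | some w =>
    by_cases hw : (w != "") = true
    · simp only [hw, Option.getD_some, if_true]
      exact congrArg some (congrArg PySem.Set.ofList (filterMap_eq_word grammar w).symm)
    · simp only [Bool.not_eq_true] at hw
      simp only [bne_eq_false_iff_eq] at hw
      subst hw
      simpa using hprod
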